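-- pv_equiv track=rewrite | github.com/DenisPGH/Python-Advanced-Course-Homework | Python_Advanced/GUI_SHOP/project/helper.py | list_package
-- ===== SOURCE A (Python) =====
-- def list_package(list_):
--     result=""
--     if len(list_)<=5:
--         result=", ".join([str(x) for x in list_])
--     elif len(list_)>5 and len(list_)<=10:
--         result=f"{list_[:5]}\n" \
--                f"{list_[5:]}"
--     elif len(list_) > 10 and len(list_)<=15:
--         result = f"{list_[:5]}\n" \
--                  f"{list_[5:10]}\n" \
--                  f"{list_[10:]}"
--
--     elif len(list_) > 15:
--         result = f"{list_[:5]}\n" \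
--                  f"{list_[5:10]}\n" \
--                  f"{list_[10:15]}\n" \
--                  f"{list_[15:]}"
--     return result
-- ===== SOURCE B (Python) =====
-- def list_package(list_):
--     if len(list_) <= 5:
--         return ", ".join(str(x) for x in list_)
--     lines = []
--     cur = []
--     for x in list_:
--         cur.append(x)
--         if len(cur) == 5 and len(lines) < 3:
--             lines.append(cur)
--             cur = []
--     if cur:
--         lines.append(cur)
--     return "\n".join(str(line) for line in lines)
-- ===== Notes on version B (the rewrite author's own statement) =====
-- stated objective: alternative
-- what changed: B replaces A's four-branch if/elif ladder over precomputed slices by a single left-to-right pass with an accumulator: it appends elements to a current chunk, flushing it to the line list each time it reaches five elements while fewer than three lines exist (so everything past index 15 stays in the last chunk), then joins the lines.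
import Mathlib
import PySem

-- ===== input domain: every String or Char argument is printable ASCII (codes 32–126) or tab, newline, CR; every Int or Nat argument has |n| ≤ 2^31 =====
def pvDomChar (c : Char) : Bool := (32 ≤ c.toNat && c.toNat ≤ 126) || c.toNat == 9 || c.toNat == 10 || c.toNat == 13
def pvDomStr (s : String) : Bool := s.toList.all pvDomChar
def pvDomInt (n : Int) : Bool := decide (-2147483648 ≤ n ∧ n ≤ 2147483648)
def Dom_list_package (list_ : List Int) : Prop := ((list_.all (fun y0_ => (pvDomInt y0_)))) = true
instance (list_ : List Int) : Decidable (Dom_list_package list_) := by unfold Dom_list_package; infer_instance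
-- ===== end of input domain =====

-- B replaces A's four-branch slice ladder by one left-to-right pass with a chunk accumulator (alternative decomposition, same cost).

-- Python's f"{list_}" for a list of ints
def pvRepr (xs : List Int) : String :=
  "[" ++ PySem.Str.join ", " (xs.map PySem.Int.toStr) ++ "]"

-- ===== PORT A =====
def list_package (list_ : List Int) : String :=
  if list_.length ≤ 5 then
    PySem.Str.join ", " (list_.map PySem.Int.toStr)
  else if list_.length > 5 ∧ list_.length ≤ 10 then
    pvRepr (PySem.List.slice list_ none (some 5)) ++ "\n" ++
    pvRepr (PySem.List.slice list_ (some 5) none)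
  else if list_.length > 10 ∧ list_.length ≤ 15 then
    pvRepr (PySem.List.slice list_ none (some 5)) ++ "\n" ++
    pvRepr (PySem.List.slice list_ (some 5) (some 10)) ++ "\n" ++
    pvRepr (PySem.List.slice list_ (some 10) none)
  else if list_.length > 15 then
    pvRepr (PySem.List.slice list_ none (some 5)) ++ "\n" ++
    pvRepr (PySem.List.slice list_ (some 5) (some 10)) ++ "\n" ++
    pvRepr (PySem.List.slice list_ (some 10) (some 15)) ++ "\n" ++
    pvRepr (PySem.List.slice list_ (some 15) none)
  else ""  -- A's initial result="" (branch unreachable)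

-- ===== PORT B =====
-- one loop step of Source B: append x to the current chunk, flush at five elements while < 3 lines
def pvStep (s : List (List Int) × List Int) (x : Int) : List (List Int) × List Int :=
  let cur := s.2 ++ [x]
  if cur.length = 5 ∧ s.1.length < 3 then (s.1 ++ [cur], []) else (s.1, cur)

def list_package_alt (list_ : List Int) : String :=
  if list_.length ≤ 5 then
    PySem.Str.join ", " (list_.map PySem.Int.toStr)
  else
    let st := list_.foldl pvStep ([], [])
    let lines := if st.2 ≠ [] then st.1 ++ [st.2] else st.1
    PySem.Str.join "\n" (lines.map pvRepr)

-- ===== PRECONDITION & SPEC =====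
def Spec_list_package (list_ : List Int) (out : String) : Prop := out = list_package_alt list_
instance (list_ : List Int) (out : String) : Decidable (Spec_list_package list_ out) := by unfold Spec_list_package; infer_instance

-- ===== CLAIM (what is proved, stated in full; the proofs are below) =====
def Claim_equal_list_package : Prop := ∀ (list_ : List Int), Dom_list_package list_ → Spec_list_package list_ (list_package list_)

-- ===== LEMMAS AND PROOFS =====

-- once three lines exist, the loop only grows the current chunk
theorem pvFold_full (xs : List Int) : ∀ (lines : List (List Int)) (cur : List Int),
    3 ≤ lines.length → xs.foldl pvStep (lines, cur) = (lines, cur ++ xs) := by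
  induction xs with
  | nil => intro lines cur _; simp
  | cons x xs ih =>
    intro lines cur h
    have : pvStep (lines, cur) x = (lines, cur ++ [x]) := by
      simp [pvStep]; omega
    simp [List.foldl_cons, this, ih lines (cur ++ [x]) h]

-- a run too short to fill the chunk never flushes
theorem pvFold_short (xs : List Int) : ∀ (lines : List (List Int)) (cur : List Int),
    cur.length + xs.length < 5 → xs.foldl pvStep (lines, cur) = (lines, cur ++ xs) := by
  induction xs with
  | nil => intro lines cur _; simp
  | cons x xs ih =>
    intro lines cur h
    have : pvStep (lines, cur) x = (lines, cur ++ [x]) := by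
      simp [pvStep]; intro h5; simp at h; omega
    simp only [List.foldl_cons, this]
    rw [ih lines (cur ++ [x]) (by simp at h ⊢; omega)]
    simp
theorem pvFold_fill (xs : List Int) : ∀ (lines : List (List Int)) (cur : List Int),
    lines.length < 3 → cur.length < 5 → 5 ≤ cur.length + xs.length →
    xs.foldl pvStep (lines, cur) =
      (xs.drop (5 - cur.length)).foldl pvStep (lines ++ [cur ++ xs.take (5 - cur.length)], []) := by
  induction xs with
  | nil => intro lines cur _ hc hlen; simp at hlen; omega
  | cons x xs ih =>
    intro lines cur hl hc hlen
    by_cases h4 : cur.length = 4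
    · have hstep : pvStep (lines, cur) x = (lines ++ [cur ++ [x]], []) := by
        simp [pvStep]; exact ⟨h4, hl⟩
      have ht : 5 - cur.length = 1 := by omega
      simp [List.foldl_cons, hstep, ht]
    · have hstep : pvStep (lines, cur) x = (lines, cur ++ [x]) := by
        simp [pvStep]; intro h; omega
      have hlen' : 5 ≤ (cur ++ [x]).length + xs.length := by simp at hlen ⊢; omega
      have := ih lines (cur ++ [x]) hl (by simp; omega) hlen'
      have ht : 5 - cur.length = (5 - (cur ++ [x]).length) + 1 := by simp; omega
      simp only [List.foldl_cons, hstep, this, ht]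
      simp [List.take_succ_cons, List.drop_succ_cons, List.append_assoc]

theorem pv_join_two (a b : String) : PySem.Str.join "\n" [a, b] = a ++ "\n" ++ b := by
  have h : (PySem.Str.join "\n" [a, b]).toList = (a ++ "\n" ++ b).toList := by
    simp [PySem.Str.toList_join, PySem.Chars.join, List.intercalate]
  exact String.toList_inj.mp h

theorem pv_join_three (a b c : String) : PySem.Str.join "\n" [a, b, c] = a ++ "\n" ++ b ++ "\n" ++ c := by
  have h : (PySem.Str.join "\n" [a, b, c]).toList = (a ++ "\n" ++ b ++ "\n" ++ c).toList := by
    simp [PySem.Str.toList_join, PySem.Chars.join, List.intercalate]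
  exact String.toList_inj.mp h

theorem pv_join_four (a b c d : String) : PySem.Str.join "\n" [a, b, c, d] = a ++ "\n" ++ b ++ "\n" ++ c ++ "\n" ++ d := by
  have h : (PySem.Str.join "\n" [a, b, c, d]).toList = (a ++ "\n" ++ b ++ "\n" ++ c ++ "\n" ++ d).toList := by
    simp [PySem.Str.toList_join, PySem.Chars.join, List.intercalate]
  exact String.toList_inj.mp h

-- ===== VERDICT (by name: the statement is the Claim_ definition above) =====
theorem list_package_spec : Claim_equal_list_package := by
  intro l _
  unfold Spec_list_package list_package list_package_alt
  by_cases h5 : l.length ≤ 5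
  · simp [h5]
  · have hfill1 := pvFold_fill l [] [] (by simp) (by simp) (by simp; omega)
    simp only [List.length_nil, Nat.sub_zero, List.nil_append] at hfill1
    by_cases h10 : l.length ≤ 10
    · by_cases h9 : l.length ≤ 9
      · have hshort := pvFold_short (l.drop 5) [l.take 5] [] (by simp; omega)
        simp only [List.nil_append] at hshort
        have hcur : l.drop 5 ≠ [] := by
          simp; omega
        simp [h5, h10, hfill1, hshort, hcur, pv_join_two,
          PySem.List.slice_to l (b := 5) (by norm_num),
          PySem.List.slice_from l (a := 5) (by norm_num)]
      · -- length exactly 10: second chunk flushes, cur empty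
        have h10e : l.length = 10 := by omega
        have hfill2 := pvFold_fill (l.drop 5) [l.take 5] [] (by simp) (by simp) (by simp; omega)
        simp only [List.nil_append] at hfill2
        have hd10 : (l.drop 5).drop 5 = [] := by
          simp [List.drop_drop]; omega
        have htk : (l.drop 5).take 5 = l.drop 5 := List.take_of_length_le (by simp; omega)
        simp [h5, h10, hfill1, hfill2, hd10, htk, pv_join_two,
          PySem.List.slice_to l (b := 5) (by norm_num),
          PySem.List.slice_from l (a := 5) (by norm_num)]
    · have hfill2 := pvFold_fill (l.drop 5) [l.take 5] [] (by simp) (by simp) (by simp; omega)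
      simp only [List.nil_append, List.drop_drop] at hfill2
      have hs510 : PySem.List.slice l (some 5) (some 10) = (l.drop 5).take 5 := by
        rw [PySem.List.slice_toNat l (by norm_num) (by norm_num)]; simp
      by_cases h15 : l.length ≤ 15
      · by_cases h14 : l.length ≤ 14
        · have hshort := pvFold_short (l.drop 10) [l.take 5, (l.drop 5).take 5] [] (by simp; omega)
          simp only [List.nil_append] at hshort
          have hcur : l.drop 10 ≠ [] := by simp; omega
          simp [h5, h10, h15, hfill1, hfill2, hshort, hcur, pv_join_three, hs510,
            PySem.List.slice_to l (b := 5) (by norm_num),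
            PySem.List.slice_from l (a := 10) (by norm_num)]
        · have h15e : l.length = 15 := by omega
          have hfill3 := pvFold_fill (l.drop 10) [l.take 5, (l.drop 5).take 5] [] (by simp) (by simp) (by simp; omega)
          simp only [List.nil_append] at hfill3
          have hd15 : (l.drop 10).drop 5 = [] := by simp [List.drop_drop]; omega
          have htk : (l.drop 10).take 5 = l.drop 10 := List.take_of_length_le (by simp; omega)
          simp [h5, h10, h15, hfill1, hfill2, hfill3, hd15, htk, pv_join_three, hs510,
            PySem.List.slice_to l (b := 5) (by norm_num),
            PySem.List.slice_from l (a := 10) (by norm_num)]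
      · have hs1015 : PySem.List.slice l (some 10) (some 15) = (l.drop 10).take 5 := by
          rw [PySem.List.slice_toNat l (by norm_num) (by norm_num)]; simp
        have hfill3 := pvFold_fill (l.drop 10) [l.take 5, (l.drop 5).take 5] [] (by simp) (by simp) (by simp; omega)
        simp only [List.nil_append, List.drop_drop] at hfill3
        have hfull := pvFold_full (l.drop 15) [l.take 5, (l.drop 5).take 5, (l.drop 10).take 5] [] (by simp)
        simp only [List.nil_append] at hfull
        have hcur : l.drop 15 ≠ [] := by simp; omega
        simp [h5, h10, h15, hfill1, hfill2, hfill3, hfull, hcur, pv_join_four, hs510, hs1015,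
          PySem.List.slice_to l (b := 5) (by norm_num),
          PySem.List.slice_from l (a := 15) (by norm_num)]
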